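-- pv_equiv track=rewrite | github.com/CarlostheCorrea/FilingLens | services/compare_service.py | _select_compare_filings
-- ===== SOURCE A (Python) =====
-- _ANNUAL_FORMS = {"10-K", "20-F"}
--
-- _QUARTERLY_FORMS = {"10-Q"}
--
-- _CURRENT_FORMS = {"8-K", "6-K"}
--
-- def _select_compare_filings(filings: list[dict], allowed_forms: list[str]) -> list[dict]:
--     allowed = set(allowed_forms)
--     filtered = [f for f in filings if f.get("form_type", "").upper() in allowed]
--     filtered.sort(key=lambda filing: filing.get("filing_date", ""), reverse=True)
--
--     selected: list[dict] = []
--     selected_accessions: set[str] = set()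
--
--     def _take(forms: set[str], limit: int):
--         count = 0
--         for filing in filtered:
--             accession = filing.get("accession_number", "")
--             if accession in selected_accessions:
--                 continue
--             if filing.get("form_type", "").upper() not in forms:
--                 continue
--             selected.append(filing)
--             selected_accessions.add(accession)
--             count += 1
--             if count >= limit:
--                 break
--
--     _take(_ANNUAL_FORMS.intersection(allowed), 1)
--     _take(_QUARTERLY_FORMS.intersection(allowed), 2)
--     _take(_CURRENT_FORMS.intersection(allowed), 5)
--
--     uncategorized = allowed - _ANNUAL_FORMS - _QUARTERLY_FORMS - _CURRENT_FORMS
--     if uncategorized: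
--         _take(uncategorized, 2)
--
--     selected.sort(key=lambda filing: filing.get("filing_date", ""), reverse=True)
--     return selected
-- ===== SOURCE B (Python) =====
-- _ANNUAL_FORMS = {"10-K", "20-F"}
--
-- _QUARTERLY_FORMS = {"10-Q"}
--
-- _CURRENT_FORMS = {"8-K", "6-K"}
--
-- def _select_compare_filings(filings: list[dict], allowed_forms: list[str]) -> list[dict]:
--     allowed = set(allowed_forms)
--     rows = sorted(
--         [f for f in filings if f.get("form_type", "").upper() in allowed],
--         key=lambda filing: filing.get("filing_date", ""),
--         reverse=True,
--     )
--
--     # One grouping pass: bucket each filing by category, keeping date-desc order.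
--     annual, quarterly, current, other = [], [], [], []
--     for f in rows:
--         form = f.get("form_type", "").upper()
--         if form in ("10-K", "20-F"):
--             annual.append(f)
--         elif form == "10-Q":
--             quarterly.append(f)
--         elif form in ("8-K", "6-K"):
--             current.append(f)
--         else:
--             other.append(f)
--
--     selected: list[dict] = []
--     seen: set[str] = set()
--     for bucket, limit in ((annual, 1), (quarterly, 2), (current, 5), (other, 2)):
--         taken = 0
--         for f in bucket:
--             if taken >= limit:
--                 break
--             accession = f.get("accession_number", "")
--             if accession in seen:
--                 continue
--             seen.add(accession)
--             selected.append(f)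
--             taken += 1
--
--     selected.sort(key=lambda filing: filing.get("filing_date", ""), reverse=True)
--     return selected
-- ===== Notes on version B (the rewrite author's own statement) =====
-- stated objective: alternative
-- what changed: B replaces A's four repeated full scans of the filtered, date-desc-sorted list with a single grouping pass into four category buckets (annual/quarterly/current/uncategorized) followed by per-bucket limited takes with the same seen-accession dedup.
import Mathlib
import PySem

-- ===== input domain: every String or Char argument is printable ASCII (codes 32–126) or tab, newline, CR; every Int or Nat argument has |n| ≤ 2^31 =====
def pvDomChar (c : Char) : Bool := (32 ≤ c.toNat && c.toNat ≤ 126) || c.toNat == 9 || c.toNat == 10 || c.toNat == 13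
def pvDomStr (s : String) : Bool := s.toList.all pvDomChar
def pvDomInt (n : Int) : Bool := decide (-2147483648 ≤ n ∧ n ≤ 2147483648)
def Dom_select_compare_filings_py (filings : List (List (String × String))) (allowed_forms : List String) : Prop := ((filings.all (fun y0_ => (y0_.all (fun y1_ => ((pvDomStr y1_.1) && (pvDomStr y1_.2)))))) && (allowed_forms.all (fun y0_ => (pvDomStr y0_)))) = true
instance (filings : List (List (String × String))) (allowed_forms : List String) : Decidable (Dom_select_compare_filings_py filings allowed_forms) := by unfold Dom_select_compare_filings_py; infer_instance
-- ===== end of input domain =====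

-- B replaces A's four repeated full scans of the filtered list with one grouping pass into
-- four category buckets followed by per-bucket limited takes (objective: alternative, not faster).

-- shared field getters: f.get("form_type","").upper(), f.get("filing_date",""), f.get("accession_number","")
def pvFormOf (f : List (String × String)) : String := PySem.Str.upper (PySem.Dict.getD (PySem.Dict.mk f) "form_type" "")
def pvDateOf (f : List (String × String)) : String := PySem.Dict.getD (PySem.Dict.mk f) "filing_date" ""
def pvAccOf (f : List (String × String)) : String := PySem.Dict.getD (PySem.Dict.mk f) "accession_number" ""

-- ===== PORT A =====
-- the inner `_take(forms, limit)` closure: scans `filtered`, skipping seen accessions and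
-- non-matching forms, appending up to `limit` filings; state = (selected, selected_accessions)
def pvA_take (forms : PySem.Set String) (limit : Int) :
    List (List (String × String)) → Int →
    (List (List (String × String)) × PySem.Set String) →
    (List (List (String × String)) × PySem.Set String)
  | [], _, st => st
  | f :: rest, count, (sel, seen) =>
    if PySem.Set.contains seen (pvAccOf f) then
      pvA_take forms limit rest count (sel, seen)
    else if PySem.Set.contains forms (pvFormOf f) = false then
      pvA_take forms limit rest count (sel, seen)
    else
      let sel' := sel ++ [f]
      let seen' := PySem.Set.add seen (pvAccOf f)
      if limit ≤ count + 1 then (sel', seen')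
      else pvA_take forms limit rest (count + 1) (sel', seen')

def select_compare_filings_py (filings : List (List (String × String))) (allowed_forms : List String) : List (List (String × String)) :=
  let allowed : PySem.Set String := PySem.Set.ofList allowed_forms
  let filtered := PySem.List.sorted (filings.filter (fun f => PySem.Set.contains allowed (pvFormOf f))) pvDateOf true
  let st1 := pvA_take (PySem.Set.inter (PySem.Set.ofList ["10-K", "20-F"]) allowed) 1 filtered 0 ([], PySem.Set.empty)
  let st2 := pvA_take (PySem.Set.inter (PySem.Set.ofList ["10-Q"]) allowed) 2 filtered 0 st1
  let st3 := pvA_take (PySem.Set.inter (PySem.Set.ofList ["8-K", "6-K"]) allowed) 5 filtered 0 st2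
  let uncategorized := PySem.Set.diff (PySem.Set.diff (PySem.Set.diff allowed (PySem.Set.ofList ["10-K", "20-F"])) (PySem.Set.ofList ["10-Q"])) (PySem.Set.ofList ["8-K", "6-K"])
  let st4 := if uncategorized = [] then st3 else pvA_take uncategorized 2 filtered 0 st3
  PySem.List.sorted st4.1 pvDateOf true

-- ===== PORT B =====
-- per-bucket take: stops at `limit`, skips seen accessions; state = (selected, seen)
def pvB_take (limit : Int) :
    List (List (String × String)) → Int →
    (List (List (String × String)) × PySem.Set String) →
    (List (List (String × String)) × PySem.Set String)
  | [], _, st => st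
  | f :: rest, taken, (sel, seen) =>
    if limit ≤ taken then (sel, seen)
    else if PySem.Set.contains seen (pvAccOf f) then
      pvB_take limit rest taken (sel, seen)
    else
      pvB_take limit rest (taken + 1) (sel ++ [f], PySem.Set.add seen (pvAccOf f))

-- the grouping pass: bucket one filing into (annual, quarterly, current, other)
def pvB_bucket (bs : List (List (String × String)) × List (List (String × String)) × List (List (String × String)) × List (List (String × String)))
    (f : List (String × String)) :
    List (List (String × String)) × List (List (String × String)) × List (List (String × String)) × List (List (String × String)) :=
  let form := pvFormOf f
  if form = "10-K" ∨ form = "20-F" then (bs.1 ++ [f], bs.2.1, bs.2.2.1, bs.2.2.2)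
  else if form = "10-Q" then (bs.1, bs.2.1 ++ [f], bs.2.2.1, bs.2.2.2)
  else if form = "8-K" ∨ form = "6-K" then (bs.1, bs.2.1, bs.2.2.1 ++ [f], bs.2.2.2)
  else (bs.1, bs.2.1, bs.2.2.1, bs.2.2.2 ++ [f])

def select_compare_filings_py_alt (filings : List (List (String × String))) (allowed_forms : List String) : List (List (String × String)) :=
  let allowed : PySem.Set String := PySem.Set.ofList allowed_forms
  let rows := PySem.List.sorted (filings.filter (fun f => PySem.Set.contains allowed (pvFormOf f))) pvDateOf true
  let bs := rows.foldl pvB_bucket ([], [], [], [])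
  let st := [(bs.1, (1 : Int)), (bs.2.1, 2), (bs.2.2.1, 5), (bs.2.2.2, 2)].foldl
      (fun st p => pvB_take p.2 p.1 0 st) ([], PySem.Set.empty)
  PySem.List.sorted st.1 pvDateOf true

-- ===== PRECONDITION & SPEC =====
def Spec_select_compare_filings_py (filings : List (List (String × String))) (allowed_forms : List String) (out : List (List (String × String))) : Prop := out = select_compare_filings_py_alt filings allowed_forms
instance (filings : List (List (String × String))) (allowed_forms : List String) (out : List (List (String × String))) : Decidable (Spec_select_compare_filings_py filings allowed_forms out) := by unfold Spec_select_compare_filings_py; infer_instance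

-- ===== CLAIM (what is proved, stated in full; the proofs are below) =====
def Claim_equal_select_compare_filings_py : Prop := ∀ (filings : List (List (String × String))) (allowed_forms : List String), Dom_select_compare_filings_py filings allowed_forms → Spec_select_compare_filings_py filings allowed_forms (select_compare_filings_py filings allowed_forms)

-- ===== LEMMAS AND PROOFS =====

-- the elif-chain predicates of B's grouping pass
def pvP0 (f : List (String × String)) : Bool := decide (pvFormOf f = "10-K" ∨ pvFormOf f = "20-F")
def pvP1 (f : List (String × String)) : Bool := !pvP0 f && decide (pvFormOf f = "10-Q")
def pvP2 (f : List (String × String)) : Bool := !pvP0 f && !decide (pvFormOf f = "10-Q") && decide (pvFormOf f = "8-K" ∨ pvFormOf f = "6-K")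
def pvP3 (f : List (String × String)) : Bool := !pvP0 f && !decide (pvFormOf f = "10-Q") && !decide (pvFormOf f = "8-K" ∨ pvFormOf f = "6-K")

lemma pvB_bucket_foldl (rows : List (List (String × String))) :
    ∀ a b c d, rows.foldl pvB_bucket (a, b, c, d) =
      (a ++ rows.filter pvP0, b ++ rows.filter pvP1, c ++ rows.filter pvP2, d ++ rows.filter pvP3) := by
  induction rows with
  | nil => simp
  | cons f rest ih =>
    intro a b c d
    by_cases h0 : pvFormOf f = "10-K" ∨ pvFormOf f = "20-F"
    · simp [List.foldl_cons, pvB_bucket, h0, ih, pvP0, pvP1, pvP2, pvP3]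
    · by_cases h1 : pvFormOf f = "10-Q"
      · simp [List.foldl_cons, pvB_bucket, h1, ih, pvP0, pvP1, pvP2, pvP3]
      · by_cases h2 : pvFormOf f = "8-K" ∨ pvFormOf f = "6-K"
        · simp [List.foldl_cons, pvB_bucket, h0, h1, h2, ih, pvP0, pvP1, pvP2, pvP3]
        · simp [List.foldl_cons, pvB_bucket, h0, h1, h2, ih, pvP0, pvP1, pvP2, pvP3]

lemma pvB_take_stop (limit : Int) (l : List (List (String × String))) (taken : Int)
    (st : List (List (String × String)) × PySem.Set String) (h : limit ≤ taken) :
    pvB_take limit l taken st = st := by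
  obtain ⟨sel, seen⟩ := st
  cases l with
  | nil => rfl
  | cons f rest => simp [pvB_take, h]

-- A's `_take` over the whole filtered list equals B's bucket take over the matching sublist
lemma pvA_take_eq_pvB_take (l : List (List (String × String))) (forms : PySem.Set String)
    (limit : Int) (p : List (String × String) → Bool)
    (hp : ∀ f ∈ l, PySem.Set.contains forms (pvFormOf f) = p f) :
    ∀ (count : Int) (st : List (List (String × String)) × PySem.Set String), count < limit →
      pvA_take forms limit l count st = pvB_take limit (l.filter p) count st := by
  induction l with
  | nil => intro count st h; rfl
  | cons f rest ih =>
    intro count st h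
    obtain ⟨sel, seen⟩ := st
    have hf := hp f (by simp)
    simp only [PySem.Set.contains_eq_listContains, List.contains_eq_mem] at hf
    have hrest : ∀ g ∈ rest, PySem.Set.contains forms (pvFormOf g) = p g :=
      fun g hg => hp g (List.mem_cons_of_mem _ hg)
    by_cases hseen : pvAccOf f ∈ seen
    · by_cases hform : pvFormOf f ∈ forms
      · have hpf : p f = true := by rw [← hf]; simp [hform]
        simp [pvA_take, pvB_take, hpf, hseen, not_le.mpr h,
          ih hrest count (sel, seen) h]
      · have hpf : p f = false := by rw [← hf]; simp [hform]
        simp [pvA_take, hpf, hseen,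
          ih hrest count (sel, seen) h]
    · by_cases hform : pvFormOf f ∈ forms
      · have hpf : p f = true := by rw [← hf]; simp [hform]
        by_cases hlim : limit ≤ count + 1
        · simp [pvA_take, pvB_take, hpf, hseen, hform, not_le.mpr h, hlim,
            pvB_take_stop limit (rest.filter p) (count + 1) _ hlim]
        · simp [pvA_take, pvB_take, hpf, hseen, hform, not_le.mpr h, hlim,
            ih hrest (count + 1) _ (lt_of_not_ge hlim)]
      · have hpf : p f = false := by rw [← hf]; simp [hform]
        simp [pvA_take, hpf, hseen, hform,
          ih hrest count (sel, seen) h]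

lemma pvCat0 (af : List String) (f : List (String × String)) (hm : pvFormOf f ∈ af) :
    PySem.Set.contains (PySem.Set.inter (PySem.Set.ofList ["10-K", "20-F"]) (PySem.Set.ofList af)) (pvFormOf f) = pvP0 f := by
  simp [PySem.Set.contains_eq_listContains, List.contains_eq_mem, PySem.Set.mem_inter,
    PySem.Set.mem_ofList, pvP0, hm]

lemma pvCat1 (af : List String) (f : List (String × String)) (hm : pvFormOf f ∈ af) :
    PySem.Set.contains (PySem.Set.inter (PySem.Set.ofList ["10-Q"]) (PySem.Set.ofList af)) (pvFormOf f) = pvP1 f := by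
  by_cases hx : pvFormOf f = "10-Q"
  · simp [PySem.Set.contains_eq_listContains, List.contains_eq_mem, PySem.Set.mem_inter,
      PySem.Set.mem_ofList, pvP1, pvP0, hx]
    exact hx ▸ hm
  · simp [PySem.Set.contains_eq_listContains, List.contains_eq_mem, PySem.Set.mem_inter,
      PySem.Set.mem_ofList, pvP1, pvP0, hx]

lemma pvCat2 (af : List String) (f : List (String × String)) (hm : pvFormOf f ∈ af) :
    PySem.Set.contains (PySem.Set.inter (PySem.Set.ofList ["8-K", "6-K"]) (PySem.Set.ofList af)) (pvFormOf f) = pvP2 f := by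
  by_cases hx : pvFormOf f = "8-K"
  · simp [PySem.Set.contains_eq_listContains, List.contains_eq_mem, PySem.Set.mem_inter,
      PySem.Set.mem_ofList, pvP2, pvP0, hx]
    exact hx ▸ hm
  · by_cases hy : pvFormOf f = "6-K"
    · simp [PySem.Set.contains_eq_listContains, List.contains_eq_mem, PySem.Set.mem_inter,
        PySem.Set.mem_ofList, pvP2, pvP0, hy]
      exact hy ▸ hm
    · simp [PySem.Set.contains_eq_listContains, List.contains_eq_mem, PySem.Set.mem_inter,
        PySem.Set.mem_ofList, pvP2, pvP0, hx, hy]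

lemma pvCat3 (af : List String) (f : List (String × String)) (hm : pvFormOf f ∈ af) :
    PySem.Set.contains (PySem.Set.diff (PySem.Set.diff (PySem.Set.diff (PySem.Set.ofList af) (PySem.Set.ofList ["10-K", "20-F"])) (PySem.Set.ofList ["10-Q"])) (PySem.Set.ofList ["8-K", "6-K"])) (pvFormOf f) = pvP3 f := by
  simp [PySem.Set.contains_eq_listContains, List.contains_eq_mem, PySem.Set.mem_diff,
    PySem.Set.mem_ofList, pvP3, pvP0, hm]

-- ===== VERDICT (by name: the statement is the Claim_ definition above) =====
theorem select_compare_filings_py_spec : Claim_equal_select_compare_filings_py := by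
  intro filings allowed_forms _
  unfold Spec_select_compare_filings_py select_compare_filings_py select_compare_filings_py_alt
  dsimp only
  set rows := PySem.List.sorted (filings.filter (fun f => PySem.Set.contains (PySem.Set.ofList allowed_forms) (pvFormOf f))) pvDateOf true with hrows
  have hallow : ∀ f ∈ rows, pvFormOf f ∈ allowed_forms := by
    intro f hf
    rw [hrows, PySem.List.mem_sorted] at hf
    have h2 := List.of_mem_filter hf
    simpa [PySem.Set.contains_eq_listContains, List.contains_eq_mem, PySem.Set.mem_ofList] using h2
  simp only [List.foldl_cons, List.foldl_nil]
  rw [pvB_bucket_foldl rows [] [] [] []]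
  simp only [List.nil_append]
  rw [pvA_take_eq_pvB_take rows _ 1 pvP0 (fun f hf => pvCat0 allowed_forms f (hallow f hf)) 0 ([], PySem.Set.empty) (by norm_num)]
  rw [pvA_take_eq_pvB_take rows _ 2 pvP1 (fun f hf => pvCat1 allowed_forms f (hallow f hf)) 0 _ (by norm_num)]
  rw [pvA_take_eq_pvB_take rows _ 5 pvP2 (fun f hf => pvCat2 allowed_forms f (hallow f hf)) 0 _ (by norm_num)]
  by_cases hu : PySem.Set.diff (PySem.Set.diff (PySem.Set.diff (PySem.Set.ofList allowed_forms) (PySem.Set.ofList ["10-K", "20-F"])) (PySem.Set.ofList ["10-Q"])) (PySem.Set.ofList ["8-K", "6-K"]) = []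
  · rw [if_pos hu]
    have hnil : rows.filter pvP3 = [] := by
      refine List.filter_eq_nil_iff.mpr (fun f hf => ?_)
      have h3 := pvCat3 allowed_forms f (hallow f hf)
      rw [hu] at h3
      simp only [← h3, PySem.Set.contains_eq_listContains, List.contains_eq_mem,
        List.not_mem_nil, decide_false, Bool.false_eq_true, not_false_eq_true]
    rw [hnil]
    rfl
  · rw [if_neg hu,
      pvA_take_eq_pvB_take rows _ 2 pvP3 (fun f hf => pvCat3 allowed_forms f (hallow f hf)) 0 _ (by norm_num)]
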